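-- pv_equiv track=rewrite | github.com/Igorocky/d2l2 | src/notes/common.py | arrange_groups_for_learning
-- ===== SOURCE A (Python) =====
-- def arrange_groups_for_learning(num_of_groups: int) -> list[list[int]]:
--     res = [list(range(num_of_groups))]
--     i = 0
--     while i < len(res):
--         cur = res[i]
--         if len(cur) > 1:
--             mid = len(cur) // 2 + len(cur) % 2
--             res.insert(i + 1, cur[mid:len(cur)])
--             res.insert(i + 2, cur[:mid])
--         i += 1
--     res.reverse()
--     return res
-- ===== SOURCE B (Python) =====
-- def arrange_groups_for_learning(num_of_groups: int) -> list[list[int]]: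
--     # Post-order recursion over (lo, hi) index ranges: it emits the binary split
--     # tree directly in A's final (reversed) order: children first, then the range.
--     def go(lo: int, hi: int) -> list[list[int]]:
--         if hi - lo <= 1:
--             return [list(range(lo, hi))]
--         mid = lo + (hi - lo) // 2 + (hi - lo) % 2
--         return go(lo, mid) + go(mid, hi) + [list(range(lo, hi))]
--     return go(0, num_of_groups)
-- ===== Notes on version B (the rewrite author's own statement) =====
-- stated objective: alternative
-- what changed: A grows one flat list by repeated mid-list inserts while scanning it with an index and reverses it at the end; B builds the same list directly by a post-order recursion over (lo, hi) index ranges (children first, then the range itself), using only appends.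
import Mathlib
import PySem

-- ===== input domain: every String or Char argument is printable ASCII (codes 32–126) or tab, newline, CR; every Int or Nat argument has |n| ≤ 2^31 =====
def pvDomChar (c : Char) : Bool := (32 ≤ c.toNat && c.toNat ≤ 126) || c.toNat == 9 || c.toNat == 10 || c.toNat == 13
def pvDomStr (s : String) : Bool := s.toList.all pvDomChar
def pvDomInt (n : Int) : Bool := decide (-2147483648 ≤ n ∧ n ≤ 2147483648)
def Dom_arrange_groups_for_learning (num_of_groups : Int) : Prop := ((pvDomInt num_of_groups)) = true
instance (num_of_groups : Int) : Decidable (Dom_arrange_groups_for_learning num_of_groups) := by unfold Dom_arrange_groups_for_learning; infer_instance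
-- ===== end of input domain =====

-- B replaces A's mid-list-insert-and-rescan loop by a direct post-order recursion over (lo, hi) index ranges (append-only).

-- ===== PORT A =====
-- A's while loop over `res` with index `i` is represented by the pair
-- (acc, todo) where acc = reverse of res[:i] (the already-visited prefix) and
-- todo = res[i:]; `res.insert(i+1, …); res.insert(i+2, …)` pushes the two
-- slices onto the front of todo (second half first, exactly as in A), and the
-- final `res.reverse()` makes acc itself the answer.  Slices are ported with
-- PySem.List.slice; `len(cur) // 2 + len(cur) % 2` is computed on the
-- nonnegative Int `(cur.length : Int)`, where Lean's `/` `%` agree with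
-- Python's.  The Nat `fuel` only makes the loop total: an entry of length
-- L > 1 is replaced by two entries whose lengths sum to L, so the weight
-- pvMeasureA strictly decreases with every iteration and the initial fuel
-- pvMeasureA res₀ is never exhausted (proved in pvLoopA_pyRange below).

-- weight of one todo entry / of the whole todo list (the loop's step bound)
def pvW (l : List Int) : Nat := if l.length = 0 then 1 else 2 * l.length - 1
def pvMeasureA (todo : List (List Int)) : Nat := (todo.map pvW).sum

def pvLoopA : Nat → List (List Int) → List (List Int) → List (List Int)
  | _, acc, [] => acc
  | 0, acc, _ => acc  -- unreachable: fuel = pvMeasureA of the initial todo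
  | fuel + 1, acc, cur :: rest =>
    if cur.length > 1 then
      let mid : Int := (cur.length : Int) / 2 + (cur.length : Int) % 2
      pvLoopA fuel (cur :: acc)
        (PySem.List.slice cur (some mid) (some (cur.length : Int)) ::
         PySem.List.slice cur none (some mid) :: rest)
    else
      pvLoopA fuel (cur :: acc) rest

def arrange_groups_for_learning (num_of_groups : Int) : List (List Int) :=
  pvLoopA (pvMeasureA [PySem.List.pyRange 0 num_of_groups 1]) []
    [PySem.List.pyRange 0 num_of_groups 1]

-- ===== PORT B =====
-- Source B's go(lo, hi); the Nat `fuel` only makes the recursion total (the `0`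
-- branch is never reached for fuel ≥ (hi - lo).toNat - 1, proved below).
def pvGo : Nat → Int → Int → List (List Int)
  | 0, lo, hi => [PySem.List.pyRange lo hi 1]  -- reached only when hi - lo ≤ 1, where it agrees with the base case
  | fuel + 1, lo, hi =>
    if hi - lo ≤ 1 then [PySem.List.pyRange lo hi 1]
    else
      let mid := lo + (hi - lo) / 2 + (hi - lo) % 2
      pvGo fuel lo mid ++ pvGo fuel mid hi ++ [PySem.List.pyRange lo hi 1]

def arrange_groups_for_learning_alt (num_of_groups : Int) : List (List Int) :=
  pvGo num_of_groups.toNat 0 num_of_groups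

-- ===== PRECONDITION & SPEC =====
def Spec_arrange_groups_for_learning (num_of_groups : Int) (out : List (List Int)) : Prop := out = arrange_groups_for_learning_alt num_of_groups
instance (num_of_groups : Int) (out : List (List Int)) : Decidable (Spec_arrange_groups_for_learning num_of_groups out) := by unfold Spec_arrange_groups_for_learning; infer_instance

-- ===== CLAIM (what is proved, stated in full; the proofs are below) =====
def Claim_equal_arrange_groups_for_learning : Prop := ∀ (num_of_groups : Int), Dom_arrange_groups_for_learning num_of_groups → Spec_arrange_groups_for_learning num_of_groups (arrange_groups_for_learning num_of_groups)

-- ===== LEMMAS AND PROOFS =====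

-- cur[:mid] with mid = len(cur)//2 + len(cur)%2, as a take
theorem pv_slice_take (cur : List Int) :
    PySem.List.slice cur none (some ((cur.length : Int) / 2 + (cur.length : Int) % 2)) =
      cur.take (cur.length / 2 + cur.length % 2) := by
  have h : ((cur.length : Int) / 2 + (cur.length : Int) % 2) =
      ((cur.length / 2 + cur.length % 2 : Nat) : Int) := by omega
  rw [h, PySem.List.slice_to_natCast]

-- cur[mid:len(cur)] as a drop
theorem pv_slice_drop (cur : List Int) :
    PySem.List.slice cur (some ((cur.length : Int) / 2 + (cur.length : Int) % 2)) (some (cur.length : Int)) =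
      cur.drop (cur.length / 2 + cur.length % 2) := by
  have h : ((cur.length : Int) / 2 + (cur.length : Int) % 2) =
      ((cur.length / 2 + cur.length % 2 : Nat) : Int) := by omega
  rw [h, PySem.List.slice_natCast]
  exact List.take_of_length_le (by simp)

-- A's loop processes the front todo entry `range(lo, hi)` (and all the pieces it
-- spawns) completely before touching `rest`; the block it prepends to acc is
-- exactly B's post-order list pvGo, and it consumes exactly pvW of the fuel.
theorem pvLoopA_pyRange (fg : Nat) : ∀ (lo hi : Int), (hi - lo).toNat ≤ fg + 1 →
    ∀ (fl : Nat) (acc rest : List (List Int)), pvW (PySem.List.pyRange lo hi 1) ≤ fl →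
      pvLoopA fl acc (PySem.List.pyRange lo hi 1 :: rest) =
        pvLoopA (fl - pvW (PySem.List.pyRange lo hi 1)) (pvGo fg lo hi ++ acc) rest := by
  induction fg with
  | zero =>
    intro lo hi hn fl acc rest hfl
    have hlen : (PySem.List.pyRange lo hi 1).length = (hi - lo).toNat :=
      PySem.List.length_pyRange_one ..
    have hw : pvW (PySem.List.pyRange lo hi 1) = 1 := by unfold pvW; split_ifs <;> omega
    obtain ⟨fl', rfl⟩ : ∃ fl', fl = fl' + 1 := ⟨fl - 1, by omega⟩
    rw [pvLoopA, if_neg (by omega), pvGo, hw]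
    simp
  | succ fg ih =>
    intro lo hi hn fl acc rest hfl
    have hlen : (PySem.List.pyRange lo hi 1).length = (hi - lo).toNat :=
      PySem.List.length_pyRange_one ..
    by_cases hle : hi - lo ≤ 1
    · -- base case of both programs
      have hw : pvW (PySem.List.pyRange lo hi 1) = 1 := by unfold pvW; split_ifs <;> omega
      obtain ⟨fl', rfl⟩ : ∃ fl', fl = fl' + 1 := ⟨fl - 1, by omega⟩
      rw [pvLoopA, if_neg (by omega), pvGo, if_pos hle, hw]
      simp
    · -- split case: hi - lo ≥ 2
      have hw : pvW (PySem.List.pyRange lo hi 1) = 2 * (hi - lo).toNat - 1 := by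
        unfold pvW; split_ifs <;> omega
      obtain ⟨fl', rfl⟩ : ∃ fl', fl = fl' + 1 := ⟨fl - 1, by omega⟩
      rw [pvLoopA, if_pos (by omega)]
      simp only [pv_slice_take, pv_slice_drop]
      simp only [hlen]
      set m : Int := lo + (hi - lo) / 2 + (hi - lo) % 2 with hm
      have hsplit : PySem.List.pyRange lo hi 1 =
          PySem.List.pyRange lo m 1 ++ PySem.List.pyRange m hi 1 :=
        PySem.List.pyRange_one_append lo m hi (by omega) (by omega)
      have hlm : (PySem.List.pyRange lo m 1).length =
          (hi - lo).toNat / 2 + (hi - lo).toNat % 2 := by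
        rw [PySem.List.length_pyRange_one]; omega
      have hrm : (PySem.List.pyRange m hi 1).length =
          (hi - lo).toNat - ((hi - lo).toNat / 2 + (hi - lo).toNat % 2) := by
        rw [PySem.List.length_pyRange_one]; omega
      have htake : (PySem.List.pyRange lo hi 1).take ((hi - lo).toNat / 2 + (hi - lo).toNat % 2) =
          PySem.List.pyRange lo m 1 := by
        rw [hsplit, ← hlm, List.take_left]
      have hdrop : (PySem.List.pyRange lo hi 1).drop ((hi - lo).toNat / 2 + (hi - lo).toNat % 2) =
          PySem.List.pyRange m hi 1 := by
        rw [hsplit, ← hlm, List.drop_left]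
      have hwl : pvW (PySem.List.pyRange lo m 1) = 2 * ((hi - lo).toNat / 2 + (hi - lo).toNat % 2) - 1 := by
        unfold pvW; split_ifs <;> omega
      have hwr : pvW (PySem.List.pyRange m hi 1) =
          2 * ((hi - lo).toNat - ((hi - lo).toNat / 2 + (hi - lo).toNat % 2)) - 1 := by
        unfold pvW; split_ifs <;> omega
      rw [htake, hdrop,
        ih m hi (by omega) fl' _ _ (by omega),
        ih lo m (by omega) _ _ _ (by omega)]
      conv_rhs => rw [pvGo, if_neg hle]
      have hfuel : fl' - pvW (PySem.List.pyRange m hi 1) - pvW (PySem.List.pyRange lo m 1) =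
          fl' + 1 - pvW (PySem.List.pyRange lo hi 1) := by omega
      rw [hfuel]
      simp [← hm, List.append_assoc]

theorem arrange_groups_for_learning_spec : Claim_equal_arrange_groups_for_learning := by
  intro n _
  unfold Spec_arrange_groups_for_learning arrange_groups_for_learning arrange_groups_for_learning_alt
  rw [pvLoopA_pyRange n.toNat 0 n (by omega) _ [] [] (by simp [pvMeasureA])]
  have h0 : pvMeasureA [PySem.List.pyRange 0 n 1] - pvW (PySem.List.pyRange 0 n 1) = 0 := by
    simp [pvMeasureA]
  rw [h0]
  simp [pvLoopA]
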